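-- pv_equiv track=rewrite | github.com/asedadus1/171.-Excel-Sheet-Column-Number | Python_solution.py | excel_sheet_column_number
-- ===== SOURCE A (Python) =====
-- def excel_sheet_column_number(column):
--    length = len(column);
--    answer =0;
--    i =len(column) -1;
--    for index, val in enumerate(column):
--       n = ord(val) - 64;
--       answer = answer + n * (26 ** i);
--       i = i-1;
--    return answer;
-- ===== SOURCE B (Python) =====
-- def excel_sheet_column_number(column):
--     answer = 0
--     for c in column:
--         answer = answer * 26 + (ord(c) - 64)
--     return answer
-- ===== Notes on version B (the rewrite author's own statement) =====
-- stated objective: faster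
-- what changed: Replaces the per-character 26**i power computation (positional sum with a decreasing exponent) by a single-pass Horner accumulation answer = answer*26 + (ord(c)-64).
import Mathlib
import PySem

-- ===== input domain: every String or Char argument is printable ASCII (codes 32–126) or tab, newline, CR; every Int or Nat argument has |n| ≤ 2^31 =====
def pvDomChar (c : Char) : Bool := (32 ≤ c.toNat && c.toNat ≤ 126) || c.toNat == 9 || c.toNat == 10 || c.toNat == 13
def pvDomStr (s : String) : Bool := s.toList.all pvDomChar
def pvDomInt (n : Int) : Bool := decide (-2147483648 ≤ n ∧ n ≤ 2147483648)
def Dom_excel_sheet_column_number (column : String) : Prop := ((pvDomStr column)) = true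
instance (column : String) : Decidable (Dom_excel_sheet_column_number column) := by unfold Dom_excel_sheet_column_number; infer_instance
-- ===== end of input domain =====

-- B replaces A's per-character 26**i power computation by a single-pass Horner accumulation (faster).

-- ===== PORT A =====
-- A keeps a decreasing exponent i (starting at len-1) and adds n * 26**i each step.
-- i ≥ 0 at every point where 26**i is evaluated (i reaches -1 only after the last
-- iteration), so (26 : Int) ^ i.toNat is exact for Python's 26 ** i here.
def excel_sheet_column_number (column : String) : Int :=
  let _length : Int := (column.toList.length : Int)
  let st :=
    (PySem.List.enumerate column.toList).foldl
      (fun (st : Int × Int) (p : Int × Char) =>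
        let n : Int := (p.2.toNat : Int) - 64
        (st.1 + n * (26 : Int) ^ st.2.toNat, st.2 - 1))
      (0, (column.toList.length : Int) - 1)
  st.1

-- ===== PORT B =====
def excel_sheet_column_number_alt (column : String) : Int :=
  column.toList.foldl (fun answer c => answer * 26 + ((c.toNat : Int) - 64)) 0

-- ===== PRECONDITION & SPEC =====
def Spec_excel_sheet_column_number (column : String) (out : Int) : Prop := out = excel_sheet_column_number_alt column
instance (column : String) (out : Int) : Decidable (Spec_excel_sheet_column_number column out) := by unfold Spec_excel_sheet_column_number; infer_instance

-- ===== CLAIM (what is proved, stated in full; the proofs are below) =====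
def Claim_equal_excel_sheet_column_number : Prop := ∀ (column : String), Dom_excel_sheet_column_number column → Spec_excel_sheet_column_number column (excel_sheet_column_number column)

-- ===== LEMMAS AND PROOFS =====

/-- The positional value Σ (ord cₖ − 64)·26^(len−1−k), defined structurally. -/
def pvVal : List Char → Int
  | [] => 0
  | c :: t => ((c.toNat : Int) - 64) * (26 : Int) ^ t.length + pvVal t

lemma pvFoldA (t : List Char) : ∀ (s a : Int),
    ((PySem.List.enumerate t s).foldl
      (fun (st : Int × Int) (p : Int × Char) =>
        (st.1 + ((p.2.toNat : Int) - 64) * (26 : Int) ^ st.2.toNat, st.2 - 1))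
      (a, (t.length : Int) - 1)).1 = a + pvVal t := by
  induction t with
  | nil => simp [PySem.List.enumerate_nil, pvVal]
  | cons c t ih =>
    intro s a
    have hcast : (((c :: t).length : Int) - 1) = (t.length : Int) := by
      simp
    rw [PySem.List.enumerate_cons, List.foldl_cons, hcast]
    have htoNat : ((t.length : Int)).toNat = t.length := Int.toNat_natCast _
    simp only [htoNat]
    rw [ih (s + 1) (a + ((c.toNat : Int) - 64) * (26 : Int) ^ t.length)]
    simp [pvVal]; ring

lemma pvFoldB (t : List Char) : ∀ (a : Int),
    t.foldl (fun answer c => answer * 26 + ((c.toNat : Int) - 64)) a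
      = a * (26 : Int) ^ t.length + pvVal t := by
  induction t with
  | nil => simp [pvVal]
  | cons c t ih =>
    intro a
    rw [List.foldl_cons, ih]
    simp [pvVal, pow_succ]; ring

-- ===== VERDICT (by name: the statement is the Claim_ definition above) =====
theorem excel_sheet_column_number_spec : Claim_equal_excel_sheet_column_number := by
  intro column _
  unfold Spec_excel_sheet_column_number excel_sheet_column_number excel_sheet_column_number_alt
  rw [pvFoldB, pvFoldA column.toList 0 0]
  simp
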